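-- pv_equiv track=rewrite | github.com/alxshine/eNNclave | tikz_generation.py | _texify_number
-- ===== SOURCE A (Python) =====
-- def _texify_number(num):
--     "uses a-j instead of 0-9 to work with tex"
--     ret = ''
--
--     if num == 0:
--         return 'a'
--
--     #  for i in range(num_digits):
--     while num > 0:
--         int_val = ord('a') + (num % 10)
--         ret += chr(int_val)
--         num //= 10
--
--         #  if num == 0:
--             #  ret += 'a'
--
--     return ret[::-1]
-- ===== SOURCE B (Python) =====
-- def _texify_number(num):
--     "uses a-j instead of 0-9 to work with tex"
--     return ''.join(chr(ord('a') + int(d)) for d in str(num))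
-- ===== Notes on version B (the rewrite author's own statement) =====
-- stated objective: idiomatic
-- what changed: B replaces A's modulo/divide loop with string concatenation and final reversal by a direct most-significant-first map over the decimal string str(num); Pre_ excludes negative input, where A's '' is an accident of the never-entered loop and B raises ValueError on the '-' character.
-- outside the precondition, e.g. on _texify_number(-5): A returns '', B raises ValueError
import Mathlib
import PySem

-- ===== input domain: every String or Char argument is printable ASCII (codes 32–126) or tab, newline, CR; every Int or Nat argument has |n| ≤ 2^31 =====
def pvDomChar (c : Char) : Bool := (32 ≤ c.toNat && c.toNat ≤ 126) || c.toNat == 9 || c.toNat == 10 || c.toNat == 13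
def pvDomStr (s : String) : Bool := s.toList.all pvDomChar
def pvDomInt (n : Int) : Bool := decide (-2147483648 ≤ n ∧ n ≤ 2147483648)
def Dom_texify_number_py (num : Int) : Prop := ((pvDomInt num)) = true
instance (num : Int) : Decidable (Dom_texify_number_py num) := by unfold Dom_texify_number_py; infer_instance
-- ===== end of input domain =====

-- B maps over the decimal string of num instead of A's modulo/divide loop plus final reversal (idiomatic).

-- ===== PORT A =====
-- the `while num > 0` loop: ret += chr(ord('a') + num % 10); num //= 10
def texifyLoopA (num : Int) (ret : List Char) : List Char :=
  if 0 < num then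
    texifyLoopA (PySem.Int.floordiv num 10)
      (ret ++ [Char.ofNat ('a'.toNat + (PySem.Int.mod num 10).toNat)])
  else ret
termination_by num.toNat
decreasing_by
  rw [PySem.Int.floordiv_eq_ediv_of_pos (by omega)]
  omega

def texify_number_py (num : Int) : String :=
  if num = 0 then "a"
  else String.mk (texifyLoopA num []).reverse   -- ret[::-1]

-- ===== PORT B =====
-- ''.join(chr(ord('a') + int(d)) for d in str(num)); int(d) on a digit char d is d.toNat - '0'.toNat
def texify_number_py_alt (num : Int) : String :=
  String.mk ((PySem.Int.toChars num).map
    (fun d => Char.ofNat ('a'.toNat + (d.toNat - '0'.toNat))))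

-- ===== PRECONDITION & SPEC =====
-- Pre_ excludes negative input, on which A still returns '' (the while-loop never runs — an
-- accident of A's implementation); B's int(d) raises ValueError on the '-' sign there.
def Pre_texify_number_py (num : Int) : Prop := 0 ≤ num
instance (num : Int) : Decidable (Pre_texify_number_py num) := by unfold Pre_texify_number_py; infer_instance
def pvWitness_texify_number_py : Int := (123)

def Spec_texify_number_py (num : Int) (out : String) : Prop := out = texify_number_py_alt num
instance (num : Int) (out : String) : Decidable (Spec_texify_number_py num out) := by unfold Spec_texify_number_py; infer_instance

-- ===== CLAIM (what is proved, stated in full; the proofs are below) =====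
def Claim_equal_texify_number_py : Prop := ∀ (num : Int), Dom_texify_number_py num → Pre_texify_number_py num → Spec_texify_number_py num (texify_number_py num)

-- ===== LEMMAS AND PROOFS =====

-- A's digit chars, least-significant first
def lsdA (n : Nat) : List Char :=
  if n = 0 then [] else Char.ofNat ('a'.toNat + n % 10) :: lsdA (n / 10)
decreasing_by omega

-- str(n)'s digit chars, least-significant first
def lsdD (n : Nat) : List Char :=
  if n = 0 then [] else Nat.digitChar (n % 10) :: lsdD (n / 10)
decreasing_by omega

lemma texifyLoopA_eq (n : Nat) : ∀ ret, texifyLoopA (n : Int) ret = ret ++ lsdA n := by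
  induction n using Nat.strong_induction_on with
  | _ n ih =>
    intro ret
    rw [texifyLoopA, lsdA]
    by_cases hn : n = 0
    · simp [hn]
    · have h10 : PySem.Int.floordiv (n : Int) 10 = ((n / 10 : Nat) : Int) :=
        PySem.Int.floordiv_natCast n 10
      have hm : PySem.Int.mod (n : Int) 10 = ((n % 10 : Nat) : Int) :=
        PySem.Int.mod_natCast n 10
      rw [if_pos (by exact_mod_cast Nat.pos_of_ne_zero hn), h10, hm,
        ih (n / 10) (by omega)]
      simp only [if_neg hn, List.append_assoc, List.singleton_append]
      congr 2

lemma toDigitsCore_eq (n : Nat) : ∀ fuel acc, 0 < n → n ≤ fuel →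
    Nat.toDigitsCore 10 fuel n acc = (lsdD n).reverse ++ acc := by
  induction n using Nat.strong_induction_on with
  | _ n ih =>
    intro fuel acc hn hfuel
    obtain ⟨m, rfl⟩ : ∃ m, fuel = m + 1 := ⟨fuel - 1, by omega⟩
    rw [Nat.toDigitsCore]
    by_cases h : n / 10 = 0
    · rw [if_pos h, lsdD, if_neg (by omega), lsdD, if_pos h]
      simp
    · rw [if_neg h, ih (n / 10) (by omega) m (Nat.digitChar (n % 10) :: acc)
        (by omega) (by omega)]
      conv_rhs => rw [lsdD, if_neg (by omega)]
      simp

lemma lsdD_map (n : Nat) :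
    (lsdD n).map (fun d => Char.ofNat ('a'.toNat + (d.toNat - '0'.toNat))) = lsdA n := by
  induction n using Nat.strong_induction_on with
  | _ n ih =>
    rw [lsdD, lsdA]
    by_cases hn : n = 0
    · simp [hn]
    · rw [if_neg hn, if_neg hn, List.map_cons, ih (n / 10) (by omega)]
      have hd : ∀ d < 10,
          Char.ofNat ('a'.toNat + ((Nat.digitChar d).toNat - '0'.toNat)) =
          Char.ofNat ('a'.toNat + d) := by decide
      rw [hd (n % 10) (by omega)]

-- ===== VERDICT (by name: the statement is the Claim_ definition above) =====
theorem texify_number_py_spec : Claim_equal_texify_number_py := by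
  intro num _ hpre
  unfold Spec_texify_number_py texify_number_py texify_number_py_alt
  by_cases h0 : num = 0
  · subst h0; decide
  · rw [if_neg h0]
    have hpos : 0 < num := by
      unfold Pre_texify_number_py at hpre; omega
    have hcast : ((num.toNat : Nat) : Int) = num := Int.toNat_of_nonneg (by omega)
    have hA : texifyLoopA num [] = lsdA num.toNat := by
      rw [← hcast, texifyLoopA_eq]; simp; congr 1; omega
    have hB : PySem.Int.toChars num = (lsdD num.toNat).reverse := by
      rw [PySem.Int.toChars, if_neg (by omega), Nat.toDigits,
        toDigitsCore_eq num.toNat (num.toNat + 1) [] (by omega) (by omega)]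
      simp
    rw [hA, hB, List.map_reverse, lsdD_map]
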